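-- pv_equiv track=rewrite | github.com/iesl/neural_relation_extraction | src/build_data/build_ctd_data.py | interaction_parser
-- ===== SOURCE A (Python) =====
-- relname2interaction = {"binding": "binds",
--                        "metabolic processing": "metabolism",
--                        "cotreatment": "co-treated",
--                        "response to substance": "susceptibility"}
--
-- def interaction_parser(text, e1, e2, relations):
--     # input the interaction description, e1, e2, and the relation list
--     # output a relation list if exist otherwise []
--
--     def parse_window(text):
--         # recursively output all windows
--         windows = []
--         text_this_layer = ""
--         leftpos = text.find("[")
--         rightpos = text.find("]")
--         text_ = text[:]
--         while leftpos != -1 and rightpos >= leftpos: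
--             text_this_layer += text_[:leftpos]
--             windows_, text_ = parse_window(text_[(leftpos+1):])
--             for i, win in enumerate(windows_[::-1]):
--                 if "co-treated" in win:
--                     text_this_layer += win.replace("co-treated", "")
--                     del windows_[-int(i+1)]
--             windows.extend(windows_)
--             leftpos = text_.find('[')
--             rightpos = text_.find(']')
--         text_this_layer += text_[:rightpos]
--         if text_this_layer != "":
--             windows.append(text_this_layer)
--         return windows, text_[(rightpos+1):]
--
--
--     rels = []
--     texts, _ = parse_window(text)
--     for t in texts:
--         if e1 in t and e2 in t:
--             for rel in relations:
--                 r = rel.replace("increases^", "increased ")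
--                 r = r.replace("decreases^", "decreased ")
--                 r = r.replace("affects^","")
--                 if r in relname2interaction:
--                     r = relname2interaction[r]
--                 if r in t:
--                     rels.append(rel)
--     return rels
-- ===== SOURCE B (Python) =====
-- relname2interaction = {"binding": "binds",
--                        "metabolic processing": "metabolism",
--                        "cotreatment": "co-treated",
--                        "response to substance": "susceptibility"}
--
--
-- def _norm(rel):
--     r = rel.replace("increases^", "increased ")
--     r = r.replace("decreases^", "decreased ")
--     r = r.replace("affects^", "")
--     return relname2interaction.get(r, r)
--
--
-- def interaction_parser(text, e1, e2, relations):
--     # Iterative bracket-window parser: an explicit stack of (windows, layer_text)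
--     # frames replaces the recursion; a frame is pushed at '[' and merged on ']'.
--     stack = [([], "")]
--     t = text
--     while True:
--         l = t.find('[')
--         r = t.find(']')
--         if l != -1 and l <= r:
--             # open a nested layer
--             windows, layer = stack[-1]
--             stack[-1] = (windows, layer + t[:l])
--             stack.append(([], ""))
--             t = t[l + 1:]
--             continue
--         # close the innermost layer
--         windows, layer = stack.pop()
--         layer += t[:r]
--         if layer:
--             windows.append(layer)
--         t = t[r + 1:]
--         if not stack:
--             texts = windows
--             break
--         # merge into the parent: "co-treated" windows dissolve into its text
--         pwindows, player = stack[-1]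
--         for w in windows:
--             if "co-treated" in w:
--                 player += w.replace("co-treated", "")
--             else:
--                 pwindows.append(w)
--         stack[-1] = (pwindows, player)
--     return [rel for s in texts if e1 in s and e2 in s
--             for rel in relations if _norm(rel) in s]
-- ===== Notes on version B (the rewrite author's own statement) =====
-- stated objective: alternative
-- what changed: Replaces the recursive parse_window descent by a single iterative loop over an explicit stack of (windows, layer_text) frames (push at '[', pop-and-merge at ']'), replaces the reversed in-place deletion of 'co-treated' windows by a forward partition into the parent frame, and turns the nested relation-matching loops into a comprehension with a normalisation helper.
import Mathlib
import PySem

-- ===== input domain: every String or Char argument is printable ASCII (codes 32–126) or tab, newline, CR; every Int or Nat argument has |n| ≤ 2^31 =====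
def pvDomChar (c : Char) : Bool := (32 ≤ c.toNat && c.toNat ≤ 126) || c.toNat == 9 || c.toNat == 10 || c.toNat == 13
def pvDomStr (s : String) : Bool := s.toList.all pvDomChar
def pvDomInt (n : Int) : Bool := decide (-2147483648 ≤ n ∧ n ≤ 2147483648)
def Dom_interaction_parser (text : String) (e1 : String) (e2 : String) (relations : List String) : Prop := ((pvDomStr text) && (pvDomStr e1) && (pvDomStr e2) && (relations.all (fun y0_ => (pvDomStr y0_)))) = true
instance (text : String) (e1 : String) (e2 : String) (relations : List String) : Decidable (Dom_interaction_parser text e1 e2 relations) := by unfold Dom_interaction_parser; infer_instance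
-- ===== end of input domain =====

-- B replaces A's recursive parse_window descent by one iterative loop over an
-- explicit stack of (windows, layer_text) frames, with a forward partition of
-- the closed windows instead of A's reversed in-place deletion (objective:
-- alternative decomposition; same results on every input).

-- shared module-level constants of both Python files
def pvCoTreated : List Char := "co-treated".toList
def pvRelDict : PySem.Dict String String :=
  ⟨[("binding", "binds"), ("metabolic processing", "metabolism"),
    ("cotreatment", "co-treated"), ("response to substance", "susceptibility")]⟩

-- ===== PORT A =====

-- one step of A's `for i, win in enumerate(windows_[::-1]): ...` loop
def pvCotreatStep (s : List (List Char) × List Char) (iw : Int × List Char) :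
    List (List Char) × List Char :=
  if PySem.Chars.isIn pvCoTreated iw.2 then
    (match PySem.List.pop? s.1 (-(iw.1 + 1)) with
     | some p => p.2
     | none => s.1,  -- Python would raise IndexError here; unreachable from parse_window
     s.2 ++ PySem.Chars.replace iw.2 pvCoTreated [])
  else s

-- A's co-treated deletion loop over the reversed snapshot windows_[::-1]
-- (the [::-1] copy is List.reverse: PySem.List.slice?_none_none_neg_one)
def pvDelLoop (ws : List (List Char)) (acc : List Char) : List (List Char) × List Char :=
  (PySem.List.enumerate ws.reverse).foldl pvCotreatStep (ws, acc)

-- parse_window, literally; the Python recursion always terminates, the fuel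
-- argument only makes the nested while/recursion structural (2·|text|+2 suffices).
mutual
def pwA : Nat → List Char → List (List Char) × List Char
  | 0, text => ([], text)  -- fuel guard, never reached from interaction_parser
  | n + 1, text =>
      let s := loopA n [] [] text
      let r := PySem.Chars.find s.2.2 [']']
      let a' := s.2.1 ++ PySem.List.slice s.2.2 none (some r)
      ((if a' = [] then s.1 else s.1 ++ [a']), PySem.List.slice s.2.2 (some (r + 1)) none)

def loopA : Nat → List (List Char) → List Char → List Char →
    List (List Char) × List Char × List Char
  | 0, w, a, t => (w, a, t)
  | n + 1, w, a, t =>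
      let l := PySem.Chars.find t ['[']
      let r := PySem.Chars.find t [']']
      if l ≠ -1 ∧ l ≤ r then
        let a1 := a ++ PySem.List.slice t none (some l)
        let p := pwA n (PySem.List.slice t (some (l + 1)) none)
        let q := pvDelLoop p.1 a1
        loopA n (w ++ q.1) q.2 p.2
      else (w, a, t)
end

def interaction_parser (text : String) (e1 : String) (e2 : String) (relations : List String) : List String :=
  let texts := (pwA (2 * text.toList.length + 2) text.toList).1
  texts.foldl (fun rels t =>
    if PySem.Chars.isIn e1.toList t && PySem.Chars.isIn e2.toList t then
      relations.foldl (fun rels rel =>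
        let r := PySem.Str.replace rel "increases^" "increased "
        let r := PySem.Str.replace r "decreases^" "decreased "
        let r := PySem.Str.replace r "affects^" ""
        let r := match PySem.Dict.get? pvRelDict r with | some v => v | none => r
        if PySem.Chars.isIn r.toList t then rels ++ [rel] else rels) rels
    else rels) []

-- ===== PORT B =====

def pvNorm (rel : String) : String :=
  let r := PySem.Str.replace rel "increases^" "increased "
  let r := PySem.Str.replace r "decreases^" "decreased "
  let r := PySem.Str.replace r "affects^" ""
  PySem.Dict.getD pvRelDict r r

-- Source B's merge loop: plain windows go to the parent's windows, "co-treated"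
-- windows dissolve into the parent's layer text
def pvClose (pws : List (List Char)) (pacc : List Char) (ws : List (List Char)) :
    List (List Char) × List Char :=
  ws.foldl (fun s w =>
    if PySem.Chars.isIn pvCoTreated w then (s.1, s.2 ++ PySem.Chars.replace w pvCoTreated [])
    else (s.1 ++ [w], s.2)) (pws, pacc)

-- Source B's `while True` loop: the stack of (windows, layer_text) frames, head = top.
-- The Python loop always terminates; the fuel argument only makes it structural
-- (2*|text|+1 suffices: each iteration lowers 2*|t| + |stack|).
def bLoop : Nat → List ((List (List Char)) × List Char) → List Char → List (List Char)
  | 0, _, _ => []  -- fuel guard, never reached from interaction_parser_alt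
  | n + 1, stack, t =>
    let l := PySem.Chars.find t ['[']
    let r := PySem.Chars.find t [']']
    if l ≠ -1 ∧ l ≤ r then
      match stack with
      | (w, a) :: st =>
          bLoop n (([], []) :: (w, a ++ PySem.List.slice t none (some l)) :: st)
            (PySem.List.slice t (some (l + 1)) none)
      | [] => []  -- unreachable: the Python stack is nonempty at the top of the loop
    else
      match stack with
      | (w, a) :: st =>
          let layer := a ++ PySem.List.slice t none (some r)
          let w' := if layer = [] then w else w ++ [layer]
          let t' := PySem.List.slice t (some (r + 1)) none
          match st with
          | [] => w'
          | (pw, pa) :: st' =>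
              let q := pvClose pw pa w'
              bLoop n ((q.1, q.2) :: st') t'
      | [] => []

def interaction_parser_alt (text : String) (e1 : String) (e2 : String) (relations : List String) : List String :=
  let texts := bLoop (2 * text.toList.length + 1) [([], [])] text.toList
  texts.flatMap (fun t =>
    if PySem.Chars.isIn e1.toList t && PySem.Chars.isIn e2.toList t then
      relations.filter (fun rel => PySem.Chars.isIn (pvNorm rel).toList t)
    else [])

-- ===== PRECONDITION & SPEC =====
def Spec_interaction_parser (text : String) (e1 : String) (e2 : String) (relations : List String) (out : List String) : Prop := out = interaction_parser_alt text e1 e2 relations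
instance (text : String) (e1 : String) (e2 : String) (relations : List String) (out : List String) : Decidable (Spec_interaction_parser text e1 e2 relations out) := by unfold Spec_interaction_parser; infer_instance

-- ===== CLAIM (what is proved, stated in full; the proofs are below) =====
def Claim_equal_interaction_parser : Prop := ∀ (text : String) (e1 : String) (e2 : String) (relations : List String), Dom_interaction_parser text e1 e2 relations → Spec_interaction_parser text e1 e2 relations (interaction_parser text e1 e2 relations)

-- ===== LEMMAS AND PROOFS =====

-- `s.find(c)` characterised as a structural recursion
def pvFirst (c : Char) : List Char → Int
  | [] => -1
  | d :: tl => if d = c then 0 else (if pvFirst c tl = -1 then -1 else pvFirst c tl + 1)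

theorem pvFirst_ge (c : Char) (s : List Char) : -1 ≤ pvFirst c s := by
  induction s with
  | nil => simp [pvFirst]
  | cons d tl ih =>
      simp only [pvFirst]
      split
      · omega
      · split
        · omega
        · omega

theorem prefix_single (c : Char) (xs : List Char) :
    List.isPrefixOf [c] xs = true ↔ xs.head? = some c := by
  cases xs with
  | nil => simp [List.isPrefixOf]
  | cons d tl =>
      constructor
      · intro h; simp [List.isPrefixOf] at h; simp [h]
      · intro h; simp at h; simp [List.isPrefixOf, h]

theorem pvFirst_go (c : Char) : ∀ (s : List Char) (k : Nat),
    PySem.Chars.find.go [c] s k = if pvFirst c s = -1 then -1 else pvFirst c s + k := by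
  intro s
  induction s with
  | nil => intro k; simp [PySem.Chars.find.go, pvFirst]
  | cons d tl ih =>
      intro k
      rw [PySem.Chars.find.go]
      by_cases h : d = c
      · subst h
        have hp : List.isPrefixOf [d] (d :: tl) = true := by simp [List.isPrefixOf]
        rw [hp]
        simp [pvFirst]
      · have hpre : List.isPrefixOf [c] (d :: tl) = false := by
          cases hb : List.isPrefixOf [c] (d :: tl)
          · rfl
          · rw [prefix_single] at hb
            simp only [List.head?_cons, Option.some.injEq] at hb
            exact absurd hb h
        rw [hpre]
        simp only [Bool.false_eq_true, if_false]
        rw [ih (k+1)]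
        by_cases h2 : pvFirst c tl = -1
        · simp [pvFirst, h, h2]
        · have hge := pvFirst_ge c tl
          have h3 : ¬ pvFirst c tl + 1 = -1 := by omega
          simp only [pvFirst, h, if_false, h2, if_false, h3]
          push_cast
          ring

theorem find_char (c : Char) (s : List Char) : PySem.Chars.find s [c] = pvFirst c s := by
  rw [PySem.Chars.find, pvFirst_go]
  by_cases h : pvFirst c s = -1 <;> simp [h]

theorem pvFirst_lt_length (c : Char) (s : List Char) (h : pvFirst c s ≠ -1) :
    0 ≤ pvFirst c s ∧ pvFirst c s < s.length := by
  induction s with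
  | nil => simp [pvFirst] at h
  | cons d tl ih =>
      by_cases hd : d = c
      · subst hd
        have hz : pvFirst d (d :: tl) = 0 := by simp [pvFirst]
        rw [hz]
        refine ⟨le_refl _, ?_⟩
        have hlen : (0:Nat) < (d :: tl).length := by simp
        exact_mod_cast hlen
      · simp only [pvFirst, hd, if_false] at h ⊢
        by_cases h2 : pvFirst c tl = -1
        · simp [h2] at h
        · have := ih h2
          simp only [h2, if_false, List.length_cons]
          push_cast
          omega


theorem eraseIdx_concat {α : Type} (xs : List α) (x : α) :
    (xs ++ [x]).eraseIdx xs.length = xs := by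
  induction xs with
  | nil => rfl
  | cons a tl ih => simp [List.eraseIdx_cons_succ, ih]

theorem pop?_concat_neg_one {α : Type} (xs : List α) (x : α) :
    PySem.List.pop? (xs ++ [x]) (-1) = some (x, xs) := by
  have hidx : PySem.List.pyIdx? (xs ++ [x]).length (-1) = some xs.length := by
    simp only [PySem.List.pyIdx?, List.length_append, List.length_singleton]
    norm_num
  simp only [PySem.List.pop?, hidx, Option.bind_some]
  have hget : (xs ++ [x])[xs.length]? = some x := by
    rw [List.getElem?_append_right (le_refl _)]
    simp
  rw [hget]
  simp only [Option.map_some]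
  rw [eraseIdx_concat]

theorem enumerate_mem {α : Type} (xs : List α) :
    ∀ (k : Int) (p : Int × α), p ∈ PySem.List.enumerate xs k → p.2 ∈ xs := by
  induction xs with
  | nil => intro k p hp; simp [PySem.List.enumerate] at hp
  | cons x tl ih =>
      intro k p hp
      rw [show PySem.List.enumerate (x :: tl) k = (k, x) :: PySem.List.enumerate tl (k+1) by
        simp [PySem.List.enumerate]] at hp
      rcases List.mem_cons.mp hp with h1 | h1
      · subst h1; simp
      · exact List.mem_cons_of_mem _ (ih (k+1) p h1)

theorem foldl_step_noop (l : List (Int × List Char))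
    (h : ∀ p ∈ l, PySem.Chars.isIn pvCoTreated p.2 = false) :
    ∀ s, l.foldl pvCotreatStep s = s := by
  induction l with
  | nil => intro s; simp
  | cons p tl ih =>
      intro s
      have hp := h p (List.mem_cons_self)
      have hstep : pvCotreatStep s p = s := by simp [pvCotreatStep, hp]
      rw [List.foldl_cons, hstep]
      exact ih (fun q hq => h q (List.mem_cons_of_mem _ hq)) s

theorem close_subfree (ws : List (List Char)) :
    ∀ (pws : List (List Char)) (pacc : List Char),
      (∀ x ∈ ws, PySem.Chars.isIn pvCoTreated x = false) →
      pvClose pws pacc ws = (pws ++ ws, pacc) := by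
  induction ws with
  | nil => intro pws pacc _; simp [pvClose]
  | cons w tl ih =>
      intro pws pacc h
      have hw := h w (List.mem_cons_self)
      have htl := fun x hx => h x (List.mem_cons_of_mem _ hx)
      show List.foldl _ _ (w :: tl) = _
      rw [List.foldl_cons]
      simp only [hw, Bool.false_eq_true, if_false]
      have := ih (pws ++ [w]) pacc htl
      simpa [pvClose] using this

theorem close_concat (pws : List (List Char)) (pacc : List Char) (ws : List (List Char)) (x : List Char) :
    pvClose pws pacc (ws ++ [x]) =
      (fun s => if PySem.Chars.isIn pvCoTreated x then (s.1, s.2 ++ PySem.Chars.replace x pvCoTreated [])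
                else (s.1 ++ [x], s.2)) (pvClose pws pacc ws) := by
  unfold pvClose
  rw [List.foldl_append]
  simp

theorem delLoop_eq_close (ws pw : List (List Char)) (pa : List Char)
    (h : ∀ x ∈ ws.dropLast, PySem.Chars.isIn pvCoTreated x = false) :
    (pw ++ (pvDelLoop ws pa).1, (pvDelLoop ws pa).2) = pvClose pw pa ws := by
  induction ws using List.reverseRecOn with
  | nil => simp [pvDelLoop, pvClose]
  | append_singleton ws₀ x _ =>
      have h0 : ∀ y ∈ ws₀, PySem.Chars.isIn pvCoTreated y = false := by
        intro y hy; exact h y (by simpa using hy)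
      have hrev : (ws₀ ++ [x]).reverse = x :: ws₀.reverse := by simp
      have henum : PySem.List.enumerate ((ws₀ ++ [x]).reverse) 0 =
          (0, x) :: PySem.List.enumerate ws₀.reverse 1 := by
        rw [hrev]; simp [PySem.List.enumerate]
      have hnoop := foldl_step_noop (PySem.List.enumerate ws₀.reverse 1)
        (fun p hp => h0 p.2 (by simpa using enumerate_mem _ 1 p hp))
      by_cases hx : PySem.Chars.isIn pvCoTreated x = true
      · have hstep : pvCotreatStep (ws₀ ++ [x], pa) (0, x) = (ws₀, pa ++ PySem.Chars.replace x pvCoTreated []) := by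
          simp [pvCotreatStep, hx, pop?_concat_neg_one]
        have hd : pvDelLoop (ws₀ ++ [x]) pa = (ws₀, pa ++ PySem.Chars.replace x pvCoTreated []) := by
          unfold pvDelLoop
          rw [henum, List.foldl_cons, hstep, hnoop]
        rw [hd, close_concat, close_subfree ws₀ pw pa h0]
        simp [hx]
      · have hxf : PySem.Chars.isIn pvCoTreated x = false := by
          cases hb : PySem.Chars.isIn pvCoTreated x
          · rfl
          · exact absurd hb hx
        have hstep : pvCotreatStep (ws₀ ++ [x], pa) (0, x) = (ws₀ ++ [x], pa) := by
          simp [pvCotreatStep, hxf]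
        have hd : pvDelLoop (ws₀ ++ [x]) pa = (ws₀ ++ [x], pa) := by
          unfold pvDelLoop
          rw [henum, List.foldl_cons, hstep, hnoop]
        rw [hd, close_concat, close_subfree ws₀ pw pa h0]
        simp [hxf]

theorem close_keeps_subfree (ws : List (List Char)) :
    ∀ (pws : List (List Char)) (pacc : List Char),
      (∀ x ∈ pws, PySem.Chars.isIn pvCoTreated x = false) →
      ∀ x ∈ (pvClose pws pacc ws).1, PySem.Chars.isIn pvCoTreated x = false := by
  induction ws with
  | nil => intro pws pacc h; simpa [pvClose] using h
  | cons w tl ih =>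
      intro pws pacc h
      simp only [pvClose, List.foldl_cons]
      by_cases hw : PySem.Chars.isIn pvCoTreated w = true
      · simp only [hw, if_true]
        exact ih pws (pacc ++ PySem.Chars.replace w pvCoTreated []) h
      · have hwf : PySem.Chars.isIn pvCoTreated w = false := by
          cases hb : PySem.Chars.isIn pvCoTreated w
          · rfl
          · exact absurd hb hw
        simp only [hwf, Bool.false_eq_true, if_false]
        refine ih (pws ++ [w]) pacc ?_
        intro x hx
        rcases List.mem_append.mp hx with h1 | h1
        · exact h x h1
        · simp at h1; subst h1; exact hwf

def exitW (s : List (List Char) × List Char × List Char) : List (List Char) :=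
  let r := pvFirst ']' s.2.2
  let a' := s.2.1 ++ (if r = -1 then s.2.2.dropLast else s.2.2.take r.toNat)
  if a' = [] then s.1 else s.1 ++ [a']

def AFull (st : List (List (List Char) × List Char)) (w : List (List Char)) (a : List Char)
    (t : List Char) : List (List Char) :=
    if h : pvFirst '[' t ≠ -1 ∧ pvFirst '[' t ≤ pvFirst ']' t then
      AFull ((w, a ++ t.take (pvFirst '[' t).toNat) :: st) [] []
        (t.drop ((pvFirst '[' t).toNat + 1))
    else
      match st with
      | [] => exitW (w, a, t)
      | (pw, pa) :: st' =>
          let q := pvDelLoop (exitW (w, a, t)) pa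
          AFull st' (pw ++ q.1) q.2 (t.drop (pvFirst ']' t + 1).toNat)
termination_by (t.length, st.length)
decreasing_by
  · have hl := pvFirst_lt_length '[' t h.1
    have : t.length ≠ 0 := by
      intro h0
      have : t = [] := List.length_eq_zero_iff.mp h0
      subst this
      simp at hl
      omega
    apply Prod.Lex.left
    simp only [List.length_drop]
    omega
  · by_cases hr : pvFirst ']' t = -1
    · have : ((pvFirst ']' t) + 1).toNat = 0 := by rw [hr]; rfl
      rw [this]
      simp only [List.drop_zero]
      apply Prod.Lex.right
      simp
    · have hrl := pvFirst_lt_length ']' t hr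
      have : t.length ≠ 0 := by
        intro h0
        have : t = [] := List.length_eq_zero_iff.mp h0
        subst this
        simp at hrl
        omega
      apply Prod.Lex.left
      simp only [List.length_drop]
      omega

def afterLoop (st : List (List (List Char) × List Char))
    (s : List (List Char) × List Char × List Char) : List (List Char) :=
  match st with
  | [] => exitW s
  | (pw, pa) :: st' =>
      let q := pvDelLoop (exitW s) pa
      AFull st' (pw ++ q.1) q.2 (s.2.2.drop (pvFirst ']' s.2.2 + 1).toNat)

theorem AFull_exit (st : List (List (List Char) × List Char)) (w : List (List Char))
    (a t : List Char) (h : ¬ (pvFirst '[' t ≠ -1 ∧ pvFirst '[' t ≤ pvFirst ']' t)) :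
    AFull st w a t = afterLoop st (w, a, t) := by
  conv_lhs => rw [AFull.eq_def]
  rw [dif_neg h]
  cases st with
  | nil => rfl
  | cons f st' => rfl

theorem AFull_enter (st : List (List (List Char) × List Char)) (w : List (List Char))
    (a t : List Char) (h : pvFirst '[' t ≠ -1 ∧ pvFirst '[' t ≤ pvFirst ']' t) :
    AFull st w a t = AFull ((w, a ++ t.take (pvFirst '[' t).toNat) :: st) [] []
      (t.drop ((pvFirst '[' t).toNat + 1)) := by
  conv_lhs => rw [AFull.eq_def]
  rw [dif_pos h]

theorem length_drop_le {α : Type} (n : Nat) (xs : List α) : (xs.drop n).length ≤ xs.length := by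
  simp only [List.length_drop]
  omega

theorem slice_from_len {α : Type} (xs : List α) (a : Int) :
    (PySem.List.slice xs (some a) none).length ≤ xs.length := by
  rw [PySem.List.slice_some_none]
  simp

theorem pw_loop_len (n : Nat) :
    (∀ t, (pwA n t).2.length ≤ t.length) ∧
    (∀ w a t, (loopA n w a t).2.2.length ≤ t.length) := by
  induction n with
  | zero => exact ⟨fun t => le_refl _, fun w a t => le_refl _⟩
  | succ n ih =>
      constructor
      · intro t
        simp only [pwA]
        exact le_trans (slice_from_len _ _) (ih.2 [] [] t)
      · intro w a t
        simp only [loopA]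
        by_cases hc : PySem.Chars.find t ['['] ≠ -1 ∧ PySem.Chars.find t ['['] ≤ PySem.Chars.find t [']']
        · rw [if_pos hc]
          refine le_trans (ih.2 _ _ _) (le_trans (ih.1 _) (slice_from_len _ _))
        · rw [if_neg hc]

theorem loopA_exit (n : Nat) (w : List (List Char)) (a t : List Char)
    (h : ¬ (pvFirst '[' t ≠ -1 ∧ pvFirst '[' t ≤ pvFirst ']' t)) :
    loopA (n+1) w a t = (w, a, t) := by
  simp only [loopA, find_char]
  rw [if_neg h]

theorem loopA_enter (n : Nat) (w : List (List Char)) (a t : List Char)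
    (h : pvFirst '[' t ≠ -1 ∧ pvFirst '[' t ≤ pvFirst ']' t) :
    loopA (n+1) w a t =
      loopA n
        (w ++ (pvDelLoop (pwA n (t.drop ((pvFirst '[' t).toNat + 1))).1
                (a ++ t.take (pvFirst '[' t).toNat)).1)
        (pvDelLoop (pwA n (t.drop ((pvFirst '[' t).toNat + 1))).1
                (a ++ t.take (pvFirst '[' t).toNat)).2
        (pwA n (t.drop ((pvFirst '[' t).toNat + 1))).2 := by
  have h0 : 0 ≤ pvFirst '[' t := (pvFirst_lt_length _ _ h.1).1
  have h1 : (pvFirst '[' t + 1).toNat = (pvFirst '[' t).toNat + 1 := by omega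
  simp only [loopA, find_char]
  rw [if_pos h, PySem.List.slice_to _ h0, PySem.List.slice_from _ (by omega : (0:Int) ≤ pvFirst '[' t + 1), h1]

theorem slice_to_first (t' : List Char) :
    PySem.List.slice t' none (some (pvFirst ']' t')) =
      (if pvFirst ']' t' = -1 then t'.dropLast else t'.take (pvFirst ']' t').toNat) := by
  by_cases hr : pvFirst ']' t' = -1
  · rw [hr, if_pos rfl]
    exact PySem.List.slice_to_neg_one t'
  · rw [if_neg hr]
    exact PySem.List.slice_to _ (pvFirst_lt_length ']' t' hr).1

theorem pwA_succ (n : Nat) (t : List Char) :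
    pwA (n+1) t = (exitW (loopA n [] [] t),
      (loopA n [] [] t).2.2.drop ((pvFirst ']' (loopA n [] [] t).2.2 + 1).toNat)) := by
  simp only [pwA, find_char]
  rw [slice_to_first]
  rw [PySem.List.slice_from _ (by have := pvFirst_ge ']' (loopA n [] [] t).2.2; omega)]
  rfl

theorem E1 (N : Nat) : ∀ (t : List Char), t.length ≤ N →
    ∀ st (w : List (List Char)) (a : List Char) (n : Nat), 2 * t.length + 1 ≤ n →
    AFull st w a t = afterLoop st (loopA n w a t) := by
  induction N with
  | zero =>
      intro t ht st w a n hn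
      have ht0 : t = [] := List.length_eq_zero_iff.mp (Nat.le_zero.mp ht)
      subst ht0
      obtain ⟨m, rfl⟩ : ∃ m, n = m + 1 := ⟨n - 1, by omega⟩
      have hcond : ¬ (pvFirst '[' ([] : List Char) ≠ -1 ∧
          pvFirst '[' ([] : List Char) ≤ pvFirst ']' ([] : List Char)) := by
        simp [pvFirst]
      rw [loopA_exit m w a [] hcond, AFull_exit _ _ _ _ hcond]
  | succ N ih =>
      intro t ht st w a n hn
      by_cases hc : pvFirst '[' t ≠ -1 ∧ pvFirst '[' t ≤ pvFirst ']' t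
      · have hl := pvFirst_lt_length '[' t hc.1
        have htpos : 1 ≤ t.length := by omega
        obtain ⟨m', rfl⟩ : ∃ m', n = m' + 2 := ⟨n - 2, by omega⟩
        have hulen : (t.drop ((pvFirst '[' t).toNat + 1)).length ≤ N := by
          simp only [List.length_drop]
          omega
        rw [loopA_enter _ _ _ _ hc, AFull_enter _ _ _ _ hc]
        rw [ih _ hulen ((w, a ++ t.take (pvFirst '[' t).toNat) :: st) [] [] m'
          (by simp only [List.length_drop]; omega)]
        rw [pwA_succ m' (t.drop ((pvFirst '[' t).toNat + 1))]
        have hlen2 : ((loopA m' [] [] (t.drop ((pvFirst '[' t).toNat + 1))).2.2.drop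
            ((pvFirst ']' (loopA m' [] [] (t.drop ((pvFirst '[' t).toNat + 1))).2.2 + 1).toNat)).length
            ≤ N := by
          refine le_trans ?_ hulen
          refine le_trans (length_drop_le _ _) ((pw_loop_len m').2 [] [] _)
        rw [afterLoop]
        rw [ih _ hlen2 st _ _ (m' + 1) ?_]
        · have h3 : ((loopA m' [] [] (t.drop ((pvFirst '[' t).toNat + 1))).2.2.drop
              ((pvFirst ']' (loopA m' [] [] (t.drop ((pvFirst '[' t).toNat + 1))).2.2 + 1).toNat)).length
              ≤ t.length - 1 := by
            refine le_trans (le_trans (length_drop_le _ _) ((pw_loop_len m').2 [] [] _)) ?_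
            simp only [List.length_drop]
            omega
          omega
      · obtain ⟨m, rfl⟩ : ∃ m, n = m + 1 := ⟨n - 1, by omega⟩
        rw [loopA_exit m w a t hc, AFull_exit _ _ _ _ hc]

theorem Atexts (t : List Char) : (pwA (2 * t.length + 2) t).1 = AFull [] [] [] t := by
  rw [show 2 * t.length + 2 = (2 * t.length + 1) + 1 from rfl, pwA_succ]
  rw [E1 t.length t (le_refl _) [] [] [] (2 * t.length + 1) (le_refl _)]
  rfl

def pvSubFree (ws : List (List Char)) : Prop :=
  ∀ x ∈ ws, PySem.Chars.isIn pvCoTreated x = false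
def pvStackOk (st : List (List (List Char) × List Char)) : Prop :=
  ∀ f ∈ st, pvSubFree f.1

theorem stackOk_tail {f : (List (List Char) × List Char)}
    {st : List (List (List Char) × List Char)} (h : pvStackOk (f :: st)) : pvStackOk st :=
  fun g hg => h g (List.mem_cons_of_mem _ hg)

theorem subfree_dropLast_w' (w : List (List Char)) (a' : List Char) (hw : pvSubFree w) :
    ∀ x ∈ (if a' = [] then w else w ++ [a']).dropLast, PySem.Chars.isIn pvCoTreated x = false := by
  intro x hx
  by_cases ha : a' = []
  · rw [if_pos ha] at hx
    exact hw x (List.mem_of_mem_dropLast hx)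
  · rw [if_neg ha] at hx
    rw [List.dropLast_concat] at hx
    exact hw x hx

-- ==== bLoop step equations ====

theorem bLoop_enter (n : Nat) (w : List (List Char)) (a : List Char)
    (st : List (List (List Char) × List Char)) (t : List Char)
    (h : pvFirst '[' t ≠ -1 ∧ pvFirst '[' t ≤ pvFirst ']' t) :
    bLoop (n + 1) ((w, a) :: st) t =
      bLoop n (([], []) :: (w, a ++ t.take (pvFirst '[' t).toNat) :: st)
        (t.drop ((pvFirst '[' t).toNat + 1)) := by
  have h0 : 0 ≤ pvFirst '[' t := (pvFirst_lt_length _ _ h.1).1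
  have h1 : (pvFirst '[' t + 1).toNat = (pvFirst '[' t).toNat + 1 := by omega
  simp only [bLoop, find_char]
  rw [if_pos h]
  rw [PySem.List.slice_to _ h0, PySem.List.slice_from _ (by omega : (0:Int) ≤ pvFirst '[' t + 1), h1]

theorem bLoop_close (n : Nat) (w pw : List (List Char)) (a pa : List Char)
    (st' : List (List (List Char) × List Char)) (t : List Char)
    (h : ¬ (pvFirst '[' t ≠ -1 ∧ pvFirst '[' t ≤ pvFirst ']' t)) :
    bLoop (n + 1) ((w, a) :: (pw, pa) :: st') t =
      bLoop n (((pvClose pw pa (exitW (w, a, t))).1, (pvClose pw pa (exitW (w, a, t))).2) :: st')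
        (t.drop ((pvFirst ']' t + 1).toNat)) := by
  simp only [bLoop, find_char]
  rw [if_neg h]
  rw [slice_to_first, PySem.List.slice_from _ (by have := pvFirst_ge ']' t; omega)]
  rfl

theorem bLoop_term (n : Nat) (w : List (List Char)) (a : List Char) (t : List Char)
    (h : ¬ (pvFirst '[' t ≠ -1 ∧ pvFirst '[' t ≤ pvFirst ']' t)) :
    bLoop (n + 1) [(w, a)] t = exitW (w, a, t) := by
  simp only [bLoop, find_char]
  rw [if_neg h]
  rw [slice_to_first]
  rfl

-- ==== the bridge: B's stack loop computes AFull ====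

theorem key (n : Nat) : ∀ (t : List Char) (st : List (List (List Char) × List Char))
    (w : List (List Char)) (a : List Char), 2 * t.length + st.length < n →
    pvSubFree w → pvStackOk st → bLoop n ((w, a) :: st) t = AFull st w a t := by
  induction n with
  | zero => intro t st w a hn _ _; omega
  | succ n ih =>
      intro t st w a hn hw hst
      by_cases hc : pvFirst '[' t ≠ -1 ∧ pvFirst '[' t ≤ pvFirst ']' t
      · have hl := pvFirst_lt_length '[' t hc.1
        rw [bLoop_enter _ _ _ _ _ hc, AFull_enter _ _ _ _ hc]
        have hm : 2 * (t.drop ((pvFirst '[' t).toNat + 1)).length +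
            ((w, a ++ t.take (pvFirst '[' t).toNat) :: st).length < n := by
          simp only [List.length_drop, List.length_cons]
          omega
        refine ih _ _ _ _ hm (by intro x hx; simp at hx) ?_
        intro f hf
        rcases List.mem_cons.mp hf with h1 | h1
        · subst h1; exact hw
        · exact hst f h1
      · cases st with
        | nil =>
            rw [bLoop_term _ _ _ _ hc, AFull_exit _ _ _ _ hc]
            rfl
        | cons f st' =>
            obtain ⟨pw, pa⟩ := f
            rw [bLoop_close _ _ _ _ _ _ _ hc, AFull_exit _ _ _ _ hc]
            simp only [afterLoop]
            have hW : exitW (w, a, t) =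
                if a ++ (if pvFirst ']' t = -1 then t.dropLast else t.take (pvFirst ']' t).toNat) = []
                then w
                else w ++ [a ++ (if pvFirst ']' t = -1 then t.dropLast else t.take (pvFirst ']' t).toNat)] := rfl
            have hclose := delLoop_eq_close (exitW (w, a, t)) pw pa (by
              rw [hW]; exact subfree_dropLast_w' w _ hw)
            have hq : pvSubFree (pvClose pw pa (exitW (w, a, t))).1 :=
              close_keeps_subfree _ pw pa (fun x hx => hst (pw, pa) (List.mem_cons_self) x hx)
            have hm : 2 * (t.drop ((pvFirst ']' t + 1).toNat)).length + st'.length < n := by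
              simp only [List.length_drop, List.length_cons] at hn ⊢
              omega
            rw [ih _ _ _ _ hm hq (stackOk_tail hst)]
            rw [← hclose]

theorem Btexts (t : List Char) : bLoop (2 * t.length + 1) [([], [])] t = AFull [] [] [] t :=
  key (2 * t.length + 1) t [] [] [] (by simp) (by intro x hx; simp at hx) (by intro f hf; simp at hf)

theorem normA_eq (r : String) :
    (match PySem.Dict.get? pvRelDict r with | some v => v | none => r) =
      PySem.Dict.getD pvRelDict r r := by
  simp only [PySem.Dict.getD]
  cases h : PySem.Dict.get? pvRelDict r <;> simp

theorem match_fold (e1 e2 : String) (relations : List String) :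
    ∀ (texts : List (List Char)) (acc : List String),
      texts.foldl (fun rels t =>
        if PySem.Chars.isIn e1.toList t && PySem.Chars.isIn e2.toList t then
          relations.foldl (fun rels rel =>
            let r := PySem.Str.replace rel "increases^" "increased "
            let r := PySem.Str.replace r "decreases^" "decreased "
            let r := PySem.Str.replace r "affects^" ""
            let r := match PySem.Dict.get? pvRelDict r with | some v => v | none => r
            if PySem.Chars.isIn r.toList t then rels ++ [rel] else rels) rels
        else rels) acc
      = acc ++ texts.flatMap (fun t =>
          if PySem.Chars.isIn e1.toList t && PySem.Chars.isIn e2.toList t then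
            relations.filter (fun rel => PySem.Chars.isIn (pvNorm rel).toList t)
          else []) := by
  intro texts
  induction texts with
  | nil => intro acc; simp
  | cons t ts ih =>
      intro acc
      rw [List.foldl_cons, List.flatMap_cons, ih]
      have hstep : (if PySem.Chars.isIn e1.toList t && PySem.Chars.isIn e2.toList t then
          relations.foldl (fun rels rel =>
            let r := PySem.Str.replace rel "increases^" "increased "
            let r := PySem.Str.replace r "decreases^" "decreased "
            let r := PySem.Str.replace r "affects^" ""
            let r := match PySem.Dict.get? pvRelDict r with | some v => v | none => r
            if PySem.Chars.isIn r.toList t then rels ++ [rel] else rels) acc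
        else acc)
        = acc ++ (if PySem.Chars.isIn e1.toList t && PySem.Chars.isIn e2.toList t then
            relations.filter (fun rel => PySem.Chars.isIn (pvNorm rel).toList t)
          else []) := by
        by_cases hc : (PySem.Chars.isIn e1.toList t && PySem.Chars.isIn e2.toList t) = true
        · rw [if_pos hc, if_pos hc]
          have hfun : (fun (rels : List String) (rel : String) =>
              let r := PySem.Str.replace rel "increases^" "increased "
              let r := PySem.Str.replace r "decreases^" "decreased "
              let r := PySem.Str.replace r "affects^" ""
              let r := match PySem.Dict.get? pvRelDict r with | some v => v | none => r
              if PySem.Chars.isIn r.toList t then rels ++ [rel] else rels)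
              = (fun (rels : List String) (rel : String) =>
                  if (fun rel => PySem.Chars.isIn (pvNorm rel).toList t) rel = true then
                    rels ++ [rel] else rels) := by
            funext rels rel
            simp only [pvNorm, normA_eq]
            rfl
          rw [hfun, PySem.List.foldl_append_if_eq_filter]
        · rw [if_neg hc, if_neg hc]
          simp
      rw [hstep, List.append_assoc]

theorem interaction_parser_main (text e1 e2 : String) (relations : List String) :
    interaction_parser text e1 e2 relations = interaction_parser_alt text e1 e2 relations := by
  simp only [interaction_parser, interaction_parser_alt]
  rw [Atexts, Btexts]
  rw [match_fold e1 e2 relations (AFull [] [] [] text.toList) []]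
  simp

-- ===== VERDICT (by name: the statement is the Claim_ definition above) =====
theorem interaction_parser_spec : Claim_equal_interaction_parser := by
  intro text e1 e2 relations _
  unfold Spec_interaction_parser
  exact interaction_parser_main text e1 e2 relations
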